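-- pv_equiv track=rewrite | github.com/autogluon/tabarena | tabarena/tabarena/simulation/ensemble_selection_config_scorer.py | _get_models_filtered_idx
-- ===== SOURCE A (Python) =====
-- def _get_models_filtered_idx(models: list[str], models_filtered: list[str]) -> tuple[list[str], list[int]]:
--     models_filtered_set = set(models_filtered)
--
--     models_seen: set[str] = set()
--     models_filtered_ordered = [
--         m for m in models if (m in models_filtered_set) and not (m in models_seen or models_seen.add(m))
--     ]
--
--     if len(models_filtered_set) < len(models_filtered_ordered):
--         models_idx: dict[str, list[int]] = {}
--         for i, m in enumerate(models):
--             models_idx.setdefault(m, []).append(i)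
--         models_filtered_idx = [models_idx[m].pop(0) for m in models_filtered_ordered]
--     else:
--         models_filtered_idx = [models.index(m) for m in models_filtered_ordered]
--
--     return models_filtered_ordered, models_filtered_idx
-- ===== SOURCE B (Python) =====
-- def _get_models_filtered_idx(models: list[str], models_filtered: list[str]) -> tuple[list[str], list[int]]:
--     wanted = set(models_filtered)
--     seen: set[str] = set()
--     names: list[str] = []
--     idx: list[int] = []
--     for i, m in enumerate(models):
--         if m in wanted and m not in seen:
--             seen.add(m)
--             names.append(m)
--             idx.append(i)
--     return names, idx
-- ===== Notes on version B (the rewrite author's own statement) =====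
-- stated objective: faster
-- what changed: Replaced the filter-comprehension followed by a per-element models.index rescan (and the dead duplicate-handling dict branch) with a single enumerate pass that records each first qualifying occurrence's name and index simultaneously.
import Mathlib
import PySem

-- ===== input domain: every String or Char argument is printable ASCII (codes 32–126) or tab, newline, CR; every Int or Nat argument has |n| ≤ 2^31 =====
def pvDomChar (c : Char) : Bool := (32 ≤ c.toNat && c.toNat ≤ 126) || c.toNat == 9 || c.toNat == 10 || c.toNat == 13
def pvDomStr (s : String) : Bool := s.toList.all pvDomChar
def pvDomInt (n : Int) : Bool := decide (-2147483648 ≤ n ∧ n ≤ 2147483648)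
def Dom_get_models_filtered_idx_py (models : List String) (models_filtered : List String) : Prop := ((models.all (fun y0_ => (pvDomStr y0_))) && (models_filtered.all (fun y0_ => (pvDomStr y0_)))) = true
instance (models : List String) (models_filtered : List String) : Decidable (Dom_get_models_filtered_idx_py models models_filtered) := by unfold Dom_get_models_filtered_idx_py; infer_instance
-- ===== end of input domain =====

-- B replaces A's filter-comprehension plus per-element models.index rescan (and its dead
-- duplicate-handling dict branch) with one enumerate pass recording names and indices together.

-- ===== PORT A =====
-- loop body of the comprehension: state = (models_seen, accumulated list); `models_seen.add(m)`
-- fires exactly when the element is kept (short-circuit of `or`)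
def pvStepA (mfs : PySem.Set String) (st : PySem.Set String × List String) (m : String) :
    PySem.Set String × List String :=
  if mfs.contains m && !(st.1.contains m) then (st.1.add m, st.2 ++ [m]) else st

def get_models_filtered_idx_py (models : List String) (models_filtered : List String) : List String × List Int :=
  let models_filtered_set : PySem.Set String := PySem.Set.ofList models_filtered
  let comp := models.foldl (pvStepA models_filtered_set) (PySem.Set.empty, [])
  let models_filtered_ordered := comp.2
  if PySem.Set.len models_filtered_set < PySem.List.len models_filtered_ordered then
    let models_idx : PySem.Dict String (List Int) :=
      (PySem.List.enumerate models).foldl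
        (fun d p => d.insert p.2 ((d.getD p.2 []) ++ [p.1])) (PySem.Dict.empty : PySem.Dict String (List Int))
    -- [models_idx[m].pop(0) …]: KeyError/IndexError cannot occur (every m comes from models);
    -- the total form leaves the state unchanged on those unreachable cases
    let r := models_filtered_ordered.foldl
      (fun (st : PySem.Dict String (List Int) × List Int) m =>
        match st.1.get? m with
        | some (i :: rest) => (st.1.insert m rest, st.2 ++ [i])
        | _ => st)
      (models_idx, [])
    (models_filtered_ordered, r.2)
  else
    -- models.index(m): ValueError cannot occur since every such m ∈ models; the getD 0 is unreachable
    (models_filtered_ordered,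
     models_filtered_ordered.map (fun m => ((PySem.List.index? models m).getD 0 : Int)))

-- ===== PORT B =====
-- loop body of B's single pass: state = (seen, names, idx)
def pvStepB (wanted : PySem.Set String) (st : PySem.Set String × List String × List Int)
    (p : Int × String) : PySem.Set String × List String × List Int :=
  if wanted.contains p.2 && !(st.1.contains p.2)
  then (st.1.add p.2, st.2.1 ++ [p.2], st.2.2 ++ [p.1])
  else st

def get_models_filtered_idx_py_alt (models : List String) (models_filtered : List String) : List String × List Int :=
  let wanted : PySem.Set String := PySem.Set.ofList models_filtered
  let st := (PySem.List.enumerate models).foldl (pvStepB wanted) (PySem.Set.empty, [], [])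
  (st.2.1, st.2.2)

-- ===== PRECONDITION & SPEC =====
def Spec_get_models_filtered_idx_py (models : List String) (models_filtered : List String) (out : List String × List Int) : Prop := out = get_models_filtered_idx_py_alt models models_filtered
instance (models : List String) (models_filtered : List String) (out : List String × List Int) : Decidable (Spec_get_models_filtered_idx_py models models_filtered out) := by unfold Spec_get_models_filtered_idx_py; infer_instance

-- ===== CLAIM (what is proved, stated in full; the proofs are below) =====
def Claim_equal_get_models_filtered_idx_py : Prop := ∀ (models : List String) (models_filtered : List String), Dom_get_models_filtered_idx_py models models_filtered → Spec_get_models_filtered_idx_py models models_filtered (get_models_filtered_idx_py models models_filtered)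

-- ===== LEMMAS AND PROOFS =====

-- B's fold carries the same (seen, names) as A's fold, for any start index
lemma pv_fold_agree (w : PySem.Set String) :
    ∀ (rest : List String) (s : PySem.Set String) (names : List String) (idxs : List Int)
      (start : Int),
      ((PySem.List.enumerate rest start).foldl (pvStepB w) (s, names, idxs)).1
        = (rest.foldl (pvStepA w) (s, names)).1
      ∧ ((PySem.List.enumerate rest start).foldl (pvStepB w) (s, names, idxs)).2.1
        = (rest.foldl (pvStepA w) (s, names)).2 := by
  intro rest
  induction rest with
  | nil => intro s names idxs start; simp [PySem.List.enumerate]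
  | cons m rest ih =>
    intro s names idxs start
    rw [PySem.List.enumerate_cons]
    by_cases h : (w.contains m && !(s.contains m)) = true
    · simp only [List.foldl_cons, pvStepA, pvStepB, h, if_pos]
      exact ih _ _ _ _
    · simp only [List.foldl_cons, pvStepA, pvStepB, h, if_neg, Bool.false_eq_true,
        not_false_eq_true]
      exact ih _ _ _ _

-- invariant of A's comprehension fold: names stays Nodup, inside w, and recorded in seen
lemma pv_fold_names_inv (w : PySem.Set String) :
    ∀ (rest : List String) (s : PySem.Set String) (names : List String),
      names.Nodup → (∀ m ∈ names, s.contains m = true) → (∀ m ∈ names, m ∈ w) →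
      (rest.foldl (pvStepA w) (s, names)).2.Nodup
        ∧ ∀ m ∈ (rest.foldl (pvStepA w) (s, names)).2, m ∈ w := by
  intro rest
  induction rest with
  | nil => intro s names h1 h2 h3; exact ⟨h1, h3⟩
  | cons m rest ih =>
    intro s names h1 h2 h3
    by_cases h : (w.contains m && !(s.contains m)) = true
    · simp only [List.foldl_cons, pvStepA, h, if_pos]
      have hw : m ∈ w := (PySem.Set.contains_iff w m).mp (Bool.and_elim_left h)
      have hns : m ∉ s := by
        have := Bool.and_elim_right h; simpa using this
      have hnm : m ∉ names := fun hm => hns ((PySem.Set.contains_iff s m).mp (h2 m hm))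
      apply ih
      · simp only [List.nodup_append, List.nodup_cons, List.nodup_nil, and_true]
        refine ⟨h1, by simp, ?_⟩
        intro a ha b hb
        simp only [List.mem_singleton] at hb
        subst hb
        rintro rfl; exact hnm ha
      · intro x hx
        rcases List.mem_append.mp hx with hx | hx
        · exact (PySem.Set.contains_iff _ x).mpr
            ((PySem.Set.mem_add _ _ _).mpr (Or.inl ((PySem.Set.contains_iff s x).mp (h2 x hx))))
        · simp at hx; subst hx
          exact (PySem.Set.contains_iff _ x).mpr ((PySem.Set.mem_add _ _ _).mpr (Or.inr rfl))
      · intro x hx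
        rcases List.mem_append.mp hx with hx | hx
        · exact h3 x hx
        · simp at hx; subst hx; exact hw
    · simp only [List.foldl_cons, pvStepA, h, if_neg, Bool.false_eq_true, not_false_eq_true]
      exact ih _ _ h1 h2 h3

-- core: B's idx list is always the map of first-occurrence indices over its names list
lemma pv_fold_idx (w : PySem.Set String) (models : List String) :
    ∀ (rest pre : List String) (s : PySem.Set String) (names : List String) (idxs : List Int),
      models = pre ++ rest →
      (∀ m, w.contains m = true → (s.contains m = true ↔ m ∈ pre)) →
      idxs = names.map (fun m => ((PySem.List.index? models m).getD 0 : Int)) →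
      ((PySem.List.enumerate rest (pre.length : Int)).foldl (pvStepB w) (s, names, idxs)).2.2
        = ((PySem.List.enumerate rest (pre.length : Int)).foldl (pvStepB w) (s, names, idxs)).2.1.map
            (fun m => ((PySem.List.index? models m).getD 0 : Int)) := by
  intro rest
  induction rest with
  | nil => intro pre s names idxs _ _ hidx; simpa [PySem.List.enumerate] using hidx
  | cons m rest ih =>
    intro pre s names idxs hm hseen hidx
    rw [PySem.List.enumerate_cons]
    have harith : (pre.length : Int) + 1 = ((pre ++ [m]).length : Int) := by
      simp [List.length_append]
    by_cases h : (w.contains m && !(s.contains m)) = true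
    · have hw : w.contains m = true := Bool.and_elim_left h
      have hns : m ∉ s := by
        have := Bool.and_elim_right h; simpa using this
      have hnp : m ∉ pre := fun hp => hns ((PySem.Set.contains_iff s m).mp ((hseen m hw).mpr hp))
      have hindex : PySem.List.index? models m = some pre.length := by
        rw [hm]
        exact (PySem.List.index?_eq_some_iff _ _ _).mpr ⟨pre, rest, rfl, rfl, hnp⟩
      simp only [List.foldl_cons, pvStepB, h, if_pos]
      rw [harith]
      apply ih (pre ++ [m])
      · simpa using hm
      · intro x hx
        constructor
        · intro hc
          rcases (PySem.Set.mem_add _ _ _).mp ((PySem.Set.contains_iff _ x).mp hc) with hc | hc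
          · exact List.mem_append.mpr
              (Or.inl ((hseen x hx).mp ((PySem.Set.contains_iff s x).mpr hc)))
          · subst hc; simp
        · intro hx2
          rcases List.mem_append.mp hx2 with hx2 | hx2
          · exact (PySem.Set.contains_iff _ x).mpr
              ((PySem.Set.mem_add _ _ _).mpr
                (Or.inl ((PySem.Set.contains_iff s x).mp ((hseen x hx).mpr hx2))))
          · simp at hx2; subst hx2
            exact (PySem.Set.contains_iff _ x).mpr ((PySem.Set.mem_add _ _ _).mpr (Or.inr rfl))
      · simp only [PySem.List.index?_eq_idxOf?] at hindex
        simp [hidx, hindex]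
    · simp only [List.foldl_cons, pvStepB, h, if_neg, Bool.false_eq_true, not_false_eq_true]
      rw [harith]
      apply ih (pre ++ [m])
      · simpa using hm
      · intro x hx
        by_cases hxm : x = m
        · subst hxm
          have hc : x ∈ s := by
            by_contra hb
            exact h (by simp [hb, (PySem.Set.contains_iff w x).mp hx])
          constructor
          · intro _; simp
          · intro _; exact (PySem.Set.contains_iff s x).mpr hc
        · rw [hseen x hx]
          simp [hxm]
      · exact hidx

-- ===== VERDICT (by name: the statement is the Claim_ definition above) =====
theorem get_models_filtered_idx_py_spec : Claim_equal_get_models_filtered_idx_py := by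
  intro models models_filtered _
  unfold Spec_get_models_filtered_idx_py
  unfold get_models_filtered_idx_py get_models_filtered_idx_py_alt
  set w : PySem.Set String := PySem.Set.ofList models_filtered with hw
  have hagree := pv_fold_agree w models PySem.Set.empty [] [] 0
  have hinv := pv_fold_names_inv w models PySem.Set.empty []
    List.nodup_nil (by intro m hm; cases hm) (by intro m hm; cases hm)
  -- the duplicate-handling branch is dead: the kept list is Nodup and inside w
  have hlen : ¬ (PySem.Set.len w < PySem.List.len (models.foldl (pvStepA w) (PySem.Set.empty, [])).2) := by
    have hsub : (models.foldl (pvStepA w) (PySem.Set.empty, [])).2 ⊆ w := fun x hx => hinv.2 x hx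
    have : (models.foldl (pvStepA w) (PySem.Set.empty, [])).2.length ≤ w.length := by
      calc (models.foldl (pvStepA w) (PySem.Set.empty, [])).2.length
          = (models.foldl (pvStepA w) (PySem.Set.empty, [])).2.toFinset.card :=
            (List.toFinset_card_of_nodup hinv.1).symm
        _ ≤ w.toFinset.card := Finset.card_le_card (fun x hx => by
            simp only [List.mem_toFinset] at *; exact hsub hx)
        _ ≤ w.length := w.toFinset_card_le
    simp only [PySem.Set.len, PySem.List.len]
    omega
  rw [if_neg hlen]
  have hidx := pv_fold_idx w models models [] PySem.Set.empty [] []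
    (by simp)
    (by intro m _; simp [PySem.Set.empty, PySem.Set.contains])
    (by simp)
  simp only [List.length_nil, Int.natCast_zero] at hidx
  refine Prod.ext ?_ ?_
  · exact hagree.2.symm
  · simp only []
    rw [hidx, hagree.2]
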